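-- pv_equiv track=rewrite | github.com/juliaolivieri/COMP_293C_Computational_Biology | homework2/gene_prediction.py | find_stopless_lengths
-- ===== SOURCE A (Python) =====
-- import math
--
-- def find_stopless_lengths(seq, thresh):
--   stops = ["TAG", "TGA", "TAA"]
--   stopless_positions = []
--   stopless_lengths = []
--
--   stopless_length = 0
--   for i in range(math.ceil(len(seq)/3)):
--     codon = seq[3*i:3*i+3]
--     if codon in stops:
--       if stopless_length > thresh:
--         stopless_positions.append(int(3*i))
--
--         stopless_lengths.append(stopless_length)
--       stopless_length = 0
--     else:
--       stopless_length += 1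
--   return stopless_positions, stopless_lengths
-- ===== SOURCE B (Python) =====
-- import math
--
-- def find_stopless_lengths(seq, thresh):
--     stops = ("TAG", "TGA", "TAA")
--     # phase 1: one flag character per codon ('S' = stop codon)
--     flags = ''.join('S' if seq[3*j:3*j+3] in stops else '.'
--                     for j in range(math.ceil(len(seq)/3)))
--     # phase 2: the stop-free runs are exactly the pieces of flags split on 'S';
--     # the last piece is the unterminated trailing run and is never recorded
--     positions, lengths = [], []
--     idx = 0
--     for run in flags.split('S')[:-1]:
--         idx += len(run)            # codon index of the stop ending this run
--         if len(run) > thresh: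
--             positions.append(3 * idx)
--             lengths.append(len(run))
--         idx += 1
--     return positions, lengths
-- ===== Notes on version B (the rewrite author's own statement) =====
-- stated objective: alternative
-- what changed: Replaces A's single-pass running-counter/flush accumulator with a two-phase decomposition: build a per-codon flag string ('S' for stop codons), split it on 'S' into the stop-free runs, and record each run's length/position from the split pieces.
import Mathlib
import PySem

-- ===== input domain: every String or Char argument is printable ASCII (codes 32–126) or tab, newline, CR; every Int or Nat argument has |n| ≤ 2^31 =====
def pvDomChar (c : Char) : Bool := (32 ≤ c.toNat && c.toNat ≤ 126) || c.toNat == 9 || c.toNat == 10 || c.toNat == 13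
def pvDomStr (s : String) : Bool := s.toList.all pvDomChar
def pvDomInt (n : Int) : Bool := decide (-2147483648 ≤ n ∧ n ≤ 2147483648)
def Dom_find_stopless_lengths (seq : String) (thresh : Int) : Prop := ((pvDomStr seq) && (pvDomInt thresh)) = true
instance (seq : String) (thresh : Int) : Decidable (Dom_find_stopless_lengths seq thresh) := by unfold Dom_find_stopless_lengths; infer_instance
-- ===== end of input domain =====

-- B replaces A's running-counter/flush accumulator with a two-phase decomposition
-- (a per-codon flag string split on stop codons, then gap lengths from the split pieces); objective: alternative.


-- ===== PORT A =====
-- stops = ["TAG", "TGA", "TAA"] (as character lists; string work is done on List Char per PySem convention)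
def pvStops : List (List Char) := [['T','A','G'], ['T','G','A'], ['T','A','A']]

-- loop body of A: state = (stopless_positions, stopless_lengths, stopless_length)
def pvAstep (s : List Char) (thresh : Int) (st : List Int × List Int × Int) (i : Int) :
    List Int × List Int × Int :=
  let codon := PySem.List.slice s (some (3*i)) (some (3*i+3))
  if codon ∈ pvStops then
    if st.2.2 > thresh then (st.1 ++ [3*i], st.2.1 ++ [st.2.2], 0)
    else (st.1, st.2.1, 0)
  else (st.1, st.2.1, st.2.2 + 1)

def find_stopless_lengths (seq : String) (thresh : Int) : List Int × List Int :=
  let s := seq.toList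
  -- math.ceil(len(seq)/3); the float division is exact enough that this equals ⌈len/3⌉ for len ≤ 2^31
  let n : Int := PySem.Int.floordiv ((s.length : Int) + 2) 3
  let st := (PySem.List.pyRange 0 n 1).foldl (pvAstep s thresh) ([], [], 0)
  (st.1, st.2.1)

-- ===== PORT B =====
-- flags.split('S'): hand transcription of Python str.split with a one-character separator
def pvSplitS : List Char → List (List Char)
  | [] => [[]]
  | c :: rest =>
    if c = 'S' then [] :: pvSplitS rest
    else
      match pvSplitS rest with
      | [] => [[c]]          -- unreachable: pvSplitS never returns []
      | r :: rs => (c :: r) :: rs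

-- loop body of B over the split pieces: state = (positions, lengths, idx)
def pvBstep (thresh : Int) (st : List Int × List Int × Int) (r : List Char) :
    List Int × List Int × Int :=
  let idx := st.2.2 + (r.length : Int)
  if (r.length : Int) > thresh then (st.1 ++ [3*idx], st.2.1 ++ [(r.length : Int)], idx + 1)
  else (st.1, st.2.1, idx + 1)

def find_stopless_lengths_alt (seq : String) (thresh : Int) : List Int × List Int :=
  let s := seq.toList
  -- math.ceil(len(seq)/3); same remark as in port A
  let n : Int := PySem.Int.floordiv ((s.length : Int) + 2) 3
  -- phase 1: one flag character per codon
  let flags := (PySem.List.pyRange 0 n 1).map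
    (fun j => if PySem.List.slice s (some (3*j)) (some (3*j+3)) ∈ pvStops then 'S' else '.')
  -- phase 2: flags.split('S')[:-1] ([:-1] on a nonempty list = dropLast), then record runs
  let runs := (pvSplitS flags).dropLast
  let st := runs.foldl (pvBstep thresh) ([], [], 0)
  (st.1, st.2.1)

-- ===== PRECONDITION & SPEC =====
def Spec_find_stopless_lengths (seq : String) (thresh : Int) (out : List Int × List Int) : Prop := out = find_stopless_lengths_alt seq thresh
instance (seq : String) (thresh : Int) (out : List Int × List Int) : Decidable (Spec_find_stopless_lengths seq thresh out) := by unfold Spec_find_stopless_lengths; infer_instance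

-- ===== CLAIM (what is proved, stated in full; the proofs are below) =====
def Claim_equal_find_stopless_lengths : Prop := ∀ (seq : String) (thresh : Int), Dom_find_stopless_lengths seq thresh → Spec_find_stopless_lengths seq thresh (find_stopless_lengths seq thresh)

-- ===== LEMMAS AND PROOFS =====

-- Abstraction of A's loop as a recursion over the flag list
-- (P, L = output lists so far, c = running stop-free length, k = codon index of the next flag).
def pvGA (thresh : Int) : List Char → List Int → List Int → Int → Int → List Int × List Int
  | [], P, L, _, _ => (P, L)
  | f :: fs, P, L, c, k =>
    if f = 'S' then
      if c > thresh then pvGA thresh fs (P ++ [3*k]) (L ++ [c]) 0 (k+1)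
      else pvGA thresh fs P L 0 (k+1)
    else pvGA thresh fs P L (c+1) (k+1)

-- Abstraction of B's loop over the split pieces, generalised by a carried prefix length c
-- of the first piece (c = 0 gives exactly B's fold).
def pvHF (thresh : Int) : List (List Char) → List Int → List Int → Int → Int → List Int × List Int
  | [], P, L, _, _ => (P, L)
  | r :: rs, P, L, c, k =>
    let c' := c + (r.length : Int)
    let k' := k + (r.length : Int)
    if c' > thresh then pvHF thresh rs (P ++ [3*k']) (L ++ [c']) 0 (k'+1)
    else pvHF thresh rs P L 0 (k'+1)

theorem pvSplitS_ne_nil (f : List Char) : pvSplitS f ≠ [] := by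
  induction f with
  | nil => simp [pvSplitS]
  | cons c rest ih =>
    unfold pvSplitS
    by_cases h : c = 'S'
    · simp [h]
    · simp only [h, if_false]
      cases hs : pvSplitS rest with
      | nil => simp
      | cons r rs => simp

-- A's port fold over pyRange equals pvGA applied to the flag list of the remaining indices.
theorem pvA_to_gA (s : List Char) (thresh n : Int) (m : Nat) :
    ∀ (k : Int) (P L : List Int) (c : Int), (n - k).toNat = m →
    (let st := (PySem.List.pyRange k n 1).foldl (pvAstep s thresh) (P, L, c); (st.1, st.2.1))
    = pvGA thresh ((PySem.List.pyRange k n 1).map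
        (fun j => if PySem.List.slice s (some (3*j)) (some (3*j+3)) ∈ pvStops then 'S' else '.'))
        P L c k := by
  induction m with
  | zero =>
    intro k P L c hm
    rw [PySem.List.pyRange_one_eq_nil (by omega)]
    simp [pvGA]
  | succ m ih =>
    intro k P L c hm
    rw [PySem.List.pyRange_one_cons (by omega)]
    by_cases hs : PySem.List.slice s (some (3*k)) (some (3*k+3)) ∈ pvStops
    · by_cases ht : c > thresh
      · simp only [List.foldl_cons, List.map_cons, hs, if_true, pvGA,
          pvAstep, ht]
        exact ih (k+1) (P ++ [3*k]) (L ++ [c]) 0 (by omega)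
      · simp only [List.foldl_cons, List.map_cons, hs, if_true, pvGA, pvAstep, ht, if_false]
        exact ih (k+1) P L 0 (by omega)
    · simp only [List.foldl_cons, List.map_cons, hs, if_false, pvGA, pvAstep]
      have hne : ('.' : Char) ≠ 'S' := by decide
      simp only [hne, if_false]
      exact ih (k+1) P L (c+1) (by omega)

-- B's port fold equals pvHF with carried prefix 0.
theorem pvB_to_hF (thresh : Int) (runs : List (List Char)) :
    ∀ (P L : List Int) (k : Int),
    (let st := runs.foldl (pvBstep thresh) (P, L, k); (st.1, st.2.1))
    = pvHF thresh runs P L 0 k := by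
  induction runs with
  | nil => intro P L k; simp [pvHF]
  | cons r rs ih =>
    intro P L k
    simp only [List.foldl_cons, pvHF, zero_add]
    by_cases ht : ((r.length : Int) > thresh)
    · simp only [pvBstep, ht, if_true]
      exact ih (P ++ [3*(k + r.length)]) (L ++ [(r.length : Int)]) (k + r.length + 1)
    · simp only [pvBstep, ht, if_false]
      exact ih P L (k + r.length + 1)

-- one-step unfolding of pvHF on a cons (definitional)
theorem pvHF_cons (thresh : Int) (r : List Char) (rs : List (List Char)) (P L : List Int) (c k : Int) :
    pvHF thresh (r :: rs) P L c k =
      (if c + (r.length : Int) > thresh then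
        pvHF thresh rs (P ++ [3*(k + (r.length : Int))]) (L ++ [c + (r.length : Int)]) 0 (k + (r.length : Int) + 1)
      else pvHF thresh rs P L 0 (k + (r.length : Int) + 1)) := rfl

-- prepending a non-separator character to the first run shifts the carried prefix and index by one
theorem pvHF_extend (thresh : Int) (f₀ : Char) (r : List Char) (T : List (List Char))
    (P L : List Int) (c k : Int) :
    pvHF thresh ((f₀ :: r) :: T) P L c k = pvHF thresh (r :: T) P L (c+1) (k+1) := by
  rw [pvHF_cons, pvHF_cons, List.length_cons]
  rw [show c + ((r.length + 1 : Nat) : Int) = c + 1 + (r.length : Int) from by push_cast; ring,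
      show k + ((r.length + 1 : Nat) : Int) = k + 1 + (r.length : Int) from by push_cast; ring]

-- Main bridge: the counter recursion over flags equals the run recursion over the split pieces.
theorem pv_gA_eq_hF (thresh : Int) (f : List Char) :
    ∀ (P L : List Int) (c k : Int),
    pvGA thresh f P L c k = pvHF thresh (pvSplitS f).dropLast P L c k := by
  induction f with
  | nil => intro P L c k; simp [pvSplitS, pvGA, pvHF]
  | cons f₀ fs ih =>
    intro P L c k
    by_cases h : f₀ = 'S'
    · -- split produces an empty first piece; both sides flush the current run
      subst h
      have hsp : pvSplitS ('S' :: fs) = [] :: pvSplitS fs := by simp [pvSplitS]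
      rw [hsp, List.dropLast_cons_of_ne_nil (pvSplitS_ne_nil fs)]
      simp only [pvGA, if_true, pvHF, List.length_nil, Nat.cast_zero, add_zero]
      by_cases ht : c > thresh
      · simp only [ht, if_true]; exact ih (P ++ [3*k]) (L ++ [c]) 0 (k+1)
      · simp only [ht, if_false]; exact ih P L 0 (k+1)
    · -- f₀ extends the first run
      obtain ⟨r, rs, hs⟩ : ∃ r rs, pvSplitS fs = r :: rs := by
        cases h' : pvSplitS fs with
        | nil => exact absurd h' (pvSplitS_ne_nil fs)
        | cons r rs => exact ⟨r, rs, rfl⟩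
      have hsp : pvSplitS (f₀ :: fs) = (f₀ :: r) :: rs := by
        unfold pvSplitS; simp [h, hs]
      have hga : pvGA thresh (f₀ :: fs) P L c k = pvGA thresh fs P L (c+1) (k+1) := by
        simp [pvGA, h]
      rw [hga, ih P L (c+1) (k+1), hsp, hs]
      cases rs with
      | nil => simp [pvHF]
      | cons r₁ rs₁ =>
        conv_lhs => rw [List.dropLast_cons_of_ne_nil (by simp)]
        conv_rhs => rw [List.dropLast_cons_of_ne_nil (by simp)]
        exact (pvHF_extend thresh f₀ r ((r₁ :: rs₁).dropLast) P L c k).symm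

-- ===== VERDICT (by name: the statement is the Claim_ definition above) =====
theorem find_stopless_lengths_spec : Claim_equal_find_stopless_lengths := by
  intro seq thresh _
  unfold Spec_find_stopless_lengths find_stopless_lengths find_stopless_lengths_alt
  set s := seq.toList
  set n : Int := PySem.Int.floordiv ((s.length : Int) + 2) 3
  rw [pvA_to_gA s thresh n (n - 0).toNat 0 [] [] 0 rfl,
      pvB_to_hF thresh _ [] [] 0,
      pv_gA_eq_hF]
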